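-- pv_equiv track=rewrite | github.com/DOCtorActoAntohich/fsa | fsa_to_regex.py | is_deterministic
-- ===== SOURCE A (Python) =====
-- k_transitions = "trans"
--
-- def is_deterministic(fsa):
-- 	"""Checks if FSA is deterministic.
--
-- 	Parameters:
-- 	- fsa -> map: a description of FSA.
--
-- 	Returns -> bool:
-- 	True if FSA is deterministic, False otherwise.
-- 	"""
--
-- 	transition_function = dict()
-- 	for state_from, transition, state_to in fsa[k_transitions]:
-- 		function_input = (state_from, transition)
-- 		if function_input not in transition_function.keys():
-- 			transition_function[function_input] = state_to;
-- 		else: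
-- 			return False
--
-- 	return True;
-- ===== SOURCE B (Python) =====
-- k_transitions = "trans"
--
-- def _no_repeats(pairs):
--     if not pairs:
--         return True
--     return pairs[0] not in pairs[1:] and _no_repeats(pairs[1:])
--
-- def is_deterministic(fsa):
--     pairs = [(state_from, transition)
--              for state_from, transition, state_to in fsa[k_transitions]]
--     return _no_repeats(pairs)
-- ===== Notes on version B (the rewrite author's own statement) =====
-- stated objective: alternative
-- what changed: Replaced A's forward scan that hashes each (state,input) key into a dict and early-returns on a hit by a hash-free recursive brute-force check: build the key list once, then recursively verify each head key does not occur in the remaining tail by direct comparison.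
import Mathlib
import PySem

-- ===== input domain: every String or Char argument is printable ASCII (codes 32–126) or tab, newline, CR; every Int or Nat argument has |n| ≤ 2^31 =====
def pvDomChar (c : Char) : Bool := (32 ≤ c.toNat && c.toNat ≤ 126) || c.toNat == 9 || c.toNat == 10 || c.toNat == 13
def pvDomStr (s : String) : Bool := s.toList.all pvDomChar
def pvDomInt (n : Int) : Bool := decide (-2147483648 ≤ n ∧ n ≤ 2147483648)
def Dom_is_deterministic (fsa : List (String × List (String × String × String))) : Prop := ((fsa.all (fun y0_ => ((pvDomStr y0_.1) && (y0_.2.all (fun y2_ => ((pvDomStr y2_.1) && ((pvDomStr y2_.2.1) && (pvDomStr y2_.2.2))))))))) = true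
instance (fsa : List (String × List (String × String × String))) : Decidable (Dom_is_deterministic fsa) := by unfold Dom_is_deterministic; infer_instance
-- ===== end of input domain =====

-- B replaces A's dict-hashing scan with a hash-free recursive brute-force check that each key is absent from the tail (alternative algorithm, O(n^2) vs O(n)).


-- ===== PORT A =====
-- the 'for state_from, transition, state_to in fsa["trans"]' loop with the dict accumulator and early return
def isDetLoopA : List (String × String × String) → PySem.Dict (String × String) String → Bool
  | [], _ => true
  | (state_from, transition, state_to) :: rest, d =>
      if d.contains (state_from, transition) then false
      else isDetLoopA rest (d.insert (state_from, transition) state_to)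

def is_deterministic (fsa : List (String × List (String × String × String))) : Bool :=
  match (PySem.Dict.mk fsa).get? "trans" with   -- fsa["trans"]; none = KeyError, excluded by Pre_
  | none => false
  | some ts => isDetLoopA ts PySem.Dict.empty

-- ===== PORT B =====
-- _no_repeats: pairs[0] not in pairs[1:] and _no_repeats(pairs[1:])
def noRepeatsB : List (String × String) → Bool
  | [] => true
  | p :: rest => (!(rest.contains p)) && noRepeatsB rest

def is_deterministic_alt (fsa : List (String × List (String × String × String))) : Bool :=
  match (PySem.Dict.mk fsa).get? "trans" with   -- fsa["trans"]; none = KeyError, excluded by Pre_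
  | none => false
  | some ts => noRepeatsB (ts.map (fun t => (t.1, t.2.1)))

-- ===== PRECONDITION & SPEC =====
-- Pre_ excludes exactly the dicts without a "trans" key, where Python A raises KeyError.
def Pre_is_deterministic (fsa : List (String × List (String × String × String))) : Prop :=
  (PySem.Dict.mk fsa).contains "trans" = true
instance (fsa : List (String × List (String × String × String))) : Decidable (Pre_is_deterministic fsa) := by unfold Pre_is_deterministic; infer_instance

def pvWitness_is_deterministic : (List (String × List (String × String × String))) :=
  [("trans", [("s0", "a", "s1"), ("s1", "a", "s0")])]

def Spec_is_deterministic (fsa : List (String × List (String × String × String))) (out : Bool) : Prop := out = is_deterministic_alt fsa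
instance (fsa : List (String × List (String × String × String))) (out : Bool) : Decidable (Spec_is_deterministic fsa out) := by unfold Spec_is_deterministic; infer_instance

-- ===== CLAIM (what is proved, stated in full; the proofs are below) =====
def Claim_equal_is_deterministic : Prop := ∀ (fsa : List (String × List (String × String × String))), Dom_is_deterministic fsa → Pre_is_deterministic fsa → Spec_is_deterministic fsa (is_deterministic fsa)

-- ===== LEMMAS AND PROOFS =====

-- B's recursion decides Nodup of the key list.
theorem pv_noRepeats_eq_nodup (xs : List (String × String)) :
    noRepeatsB xs = decide xs.Nodup := by
  induction xs with
  | nil => simp [noRepeatsB]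
  | cons p rest ih =>
      by_cases h : p ∈ rest
      · simp [noRepeatsB, h, ih]
      · simp [noRepeatsB, h, ih]

-- A's loop returns true iff the existing dict keys together with the new keys are all distinct.
theorem pv_loopA_eq (l : List (String × String × String))
    (d : PySem.Dict (String × String) String) (hd : d.keys.Nodup) :
    isDetLoopA l d = decide ((d.keys ++ l.map (fun t => (t.1, t.2.1))).Nodup) := by
  induction l generalizing d with
  | nil => simp [isDetLoopA, hd]
  | cons t l ih =>
      obtain ⟨sf, tr, st⟩ := t
      by_cases hc : d.contains (sf, tr)
      · have hmem : (sf, tr) ∈ d.keys := (PySem.Dict.contains_iff_mem_keys d _).1 hc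
        have hbad : ¬ (d.keys ++ (sf, tr) :: l.map (fun t => (t.1, t.2.1))).Nodup := by
          intro hnd
          have := (List.nodup_append.1 hnd).2.2
          exact this (sf, tr) hmem (sf, tr) List.mem_cons_self rfl
        rw [isDetLoopA, if_pos hc, List.map_cons]
        exact (decide_eq_false hbad).symm
      · have hk : (d.insert (sf, tr) st).keys = d.keys ++ [(sf, tr)] :=
          PySem.Dict.keys_insert_of_not_contains d st (by simpa using hc)
        have hnd' : (d.insert (sf, tr) st).keys.Nodup := by
          rw [hk]
          refine List.Nodup.append hd (List.nodup_singleton _) ?_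
          intro a ha hb
          simp at hb
          subst hb
          exact hc ((PySem.Dict.contains_iff_mem_keys d _).2 ha)
        rw [isDetLoopA, if_neg hc, ih _ hnd', hk]
        simp [List.append_assoc]

-- ===== VERDICT (by name: the statement is the Claim_ definition above) =====
theorem is_deterministic_spec : Claim_equal_is_deterministic := by
  intro fsa _ _
  unfold Spec_is_deterministic is_deterministic is_deterministic_alt
  cases h : (PySem.Dict.mk fsa).get? "trans" with
  | none => rfl
  | some ts =>
      simp only
      rw [pv_loopA_eq ts PySem.Dict.empty (by simp [PySem.Dict.keys_empty]),
          pv_noRepeats_eq_nodup]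
      simp [PySem.Dict.keys_empty]
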